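-- pv_equiv track=rewrite | github.com/michalfilippi/IntroductionToBioinformatics | utils.py | n_dim_cube_predecessors
-- ===== SOURCE A (Python) =====
-- def n_dim_cube_predecessors(position):
--     """Generates all preceding positions to 'position'. Preceding position is
--     position with all coordinates equal or lesser by one then original position.
--     First returned position is identical position.
--
--     :param position: position in n-dim cube
--     :return: generator of all preceding positions
--     """
--
--     if len(position) == 0:
--         yield tuple()
--         return
--
--     for pos in n_dim_cube_predecessors(position[1:]):
--         yield (position[0],) + pos
--         if position[0] - 1 >= 0:
--             yield (position[0] - 1,) + pos
-- ===== SOURCE B (Python) =====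
-- def n_dim_cube_predecessors(position):
--     """Iterative right-to-left fold: build the full list of predecessor
--     tuples by extending suffix results with each coordinate's choices."""
--     results = [()]
--     for c in reversed(position):
--         opts = [c] if c - 1 < 0 else [c, c - 1]
--         results = [(o,) + r for r in results for o in opts]
--     yield from results
-- ===== Notes on version B (the rewrite author's own statement) =====
-- stated objective: alternative
-- what changed: Replaces the recursive generator with an iterative right-to-left fold that builds the whole result list by a product-style comprehension extending suffix results with each coordinate's choice list.
import Mathlib
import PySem

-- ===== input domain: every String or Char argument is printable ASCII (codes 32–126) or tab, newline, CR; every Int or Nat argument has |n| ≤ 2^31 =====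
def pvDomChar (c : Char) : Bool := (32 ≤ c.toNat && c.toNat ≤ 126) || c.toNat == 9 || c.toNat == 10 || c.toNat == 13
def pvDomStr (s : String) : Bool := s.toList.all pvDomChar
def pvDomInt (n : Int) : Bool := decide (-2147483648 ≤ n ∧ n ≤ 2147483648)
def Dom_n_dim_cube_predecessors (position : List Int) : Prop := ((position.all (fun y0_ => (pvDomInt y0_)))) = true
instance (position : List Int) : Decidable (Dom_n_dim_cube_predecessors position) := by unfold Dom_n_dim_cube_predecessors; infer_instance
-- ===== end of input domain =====

-- ===== PORT A =====
-- literal port of A's recursive generator (yield order preserved via list append)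
def n_dim_cube_predecessors : List Int → List (List Int)
  | [] => [[]]
  | x :: rest =>
    (n_dim_cube_predecessors rest).flatMap (fun pos =>
      [x :: pos] ++ (if x - 1 ≥ 0 then [(x - 1) :: pos] else []))

-- ===== PORT B =====
-- literal port of B: iterative fold over reversed(position) building the result list
def n_dim_cube_predecessors_alt (position : List Int) : List (List Int) :=
  position.reverse.foldl (fun results c =>
    let opts : List Int := if c - 1 < 0 then [c] else [c, c - 1]
    results.flatMap (fun r => opts.map (fun o => o :: r))) [[]]

-- ===== PRECONDITION & SPEC =====
def Spec_n_dim_cube_predecessors (position : List Int) (out : List (List Int)) : Prop := out = n_dim_cube_predecessors_alt position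
instance (position : List Int) (out : List (List Int)) : Decidable (Spec_n_dim_cube_predecessors position out) := by unfold Spec_n_dim_cube_predecessors; infer_instance

-- ===== CLAIM (what is proved, stated in full; the proofs are below) =====
def Claim_equal_n_dim_cube_predecessors : Prop := ∀ (position : List Int), Dom_n_dim_cube_predecessors position → Spec_n_dim_cube_predecessors position (n_dim_cube_predecessors position)

-- ===== LEMMAS AND PROOFS =====

-- ===== VERDICT (by name: the statement is the Claim_ definition above) =====
lemma alt_eq_foldr (position : List Int) :
    n_dim_cube_predecessors_alt position =
      position.foldr (fun c results =>
        results.flatMap (fun r => (if c - 1 < 0 then [c] else [c, c - 1]).map (fun o => o :: r))) [[]] := by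
  unfold n_dim_cube_predecessors_alt
  rw [List.foldl_reverse]

lemma a_eq_alt (position : List Int) :
    n_dim_cube_predecessors position = n_dim_cube_predecessors_alt position := by
  rw [alt_eq_foldr]
  induction position with
  | nil => rfl
  | cons x rest ih =>
    simp only [n_dim_cube_predecessors, ih, List.foldr_cons]
    apply List.flatMap_congr
    intro pos _
    by_cases h : x - 1 < 0
    · have h2 : ¬ (x - 1 ≥ 0) := by omega
      simp [h, h2] <;> omega
    · have h2 : x - 1 ≥ 0 := by omega
      simp [h, h2] <;> omega

theorem n_dim_cube_predecessors_spec : Claim_equal_n_dim_cube_predecessors := by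
  intro position _
  unfold Spec_n_dim_cube_predecessors
  exact a_eq_alt position
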